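-- pv_equiv track=rewrite | github.com/Golo300/AdeventOfCode | 2025/day6/main.py | calculateAll
-- ===== SOURCE A (Python) =====
-- def calculateAll(matrix, operators):
--     result = 0
--
--     for i in range(3):
--         matrix = list(zip(*matrix[::-1]))
--
--     matrix = ["".join(row) for row in matrix]
--     matrix = matrix[1:]
--
--     column = 1
--     operator = operators[len(operators) - column]
--     columnsResult = 0 if operator == "+" else 1
--
--     for c in matrix:
--         if c.strip() == "":
--             column += 1
--             operator = operators[len(operators) - column]
--             result += columnsResult
--             columnsResult = 0 if operator == "+" else 1
--             continue
--         value = int(c)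
--         if operator == "*":
--             columnsResult *= value
--         else:
--             columnsResult += value
--     result += columnsResult
--     return result
-- ===== SOURCE B (Python) =====
-- def _groupValue(op, g):
--     value = 0 if op == "+" else 1
--     for v in g:
--         value = value * v if op == "*" else value + v
--     return value
--
--
-- def calculateAll(matrix, operators):
--     for _ in range(3):
--         matrix = list(zip(*matrix[::-1]))
--     rows = ["".join(r) for r in matrix][1:]
--     groups = []
--     cur = []
--     for r in rows:
--         if r.strip() == "":
--             groups.append(cur)
--             cur = []
--         else:
--             cur.append(int(r))
--     groups.append(cur)
--     ops_rev = operators[::-1]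
--     total = 0
--     for k, g in enumerate(groups):
--         total += _groupValue(ops_rev[k], g)
--     return total
-- ===== Notes on version B (the rewrite author's own statement) =====
-- stated objective: alternative
-- what changed: B replaces A's single running scan with mutated column/operator/accumulator state by a two-phase decomposition: split the row strings into groups at blank rows, then reduce each group against the reversed operator list.
-- outside the precondition, e.g. on calculateAll([[' ', '4']], ['+']): A returns 0, B raises IndexError; on calculateAll([[' ', '7', '3', ' ']], ['x']): A returns 12, B raises IndexError
import Mathlib
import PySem

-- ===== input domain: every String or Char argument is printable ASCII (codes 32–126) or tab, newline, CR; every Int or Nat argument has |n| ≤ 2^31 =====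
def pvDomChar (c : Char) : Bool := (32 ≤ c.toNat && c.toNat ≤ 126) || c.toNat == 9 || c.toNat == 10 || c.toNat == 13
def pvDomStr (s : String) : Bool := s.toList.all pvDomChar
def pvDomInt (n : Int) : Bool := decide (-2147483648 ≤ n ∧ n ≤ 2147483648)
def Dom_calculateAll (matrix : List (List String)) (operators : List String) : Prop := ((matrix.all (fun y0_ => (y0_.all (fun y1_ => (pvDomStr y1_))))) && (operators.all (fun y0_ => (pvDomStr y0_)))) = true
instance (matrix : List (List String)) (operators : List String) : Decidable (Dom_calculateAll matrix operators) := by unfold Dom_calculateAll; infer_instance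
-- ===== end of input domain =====

-- B replaces A's single running scan (column/operator/accumulator state) by split-into-groups
-- then per-group reduction indexed from the reversed operator list; same cost, different decomposition.


-- ===== PORT A =====
-- shared preprocessing, identical lines in both Pythons:
-- zip(*m): truncating transpose (stops at the shortest row; zip() of no rows is empty)
def pvZipStarAux : Nat → List (List String) → List (List String)
  | 0, _ => []
  | fuel + 1, m =>
    if m ≠ [] ∧ ∀ r ∈ m, r ≠ [] then
      (m.map (fun r => r.headD "")) :: pvZipStarAux fuel (m.map List.tail)
    else []

-- fuel = length of the first row bounds the number of produced rows exactly
def pvZipStar (m : List (List String)) : List (List String) :=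
  pvZipStarAux (m.headD []).length m

-- matrix = list(zip(*matrix[::-1]))
def pvRot (m : List (List String)) : List (List String) := pvZipStar m.reverse

-- three rotations, then ["".join(row) for row in matrix][1:]  (matrix[1:] = drop first row)
def pvRows (matrix : List (List String)) : List String :=
  (((pvRot (pvRot (pvRot matrix))).map (fun row => PySem.Str.join "" row)).drop 1)

-- the for-loop of A, state (result, column, operator, columnsResult)
def aLoop (operators : List String) (rows : List String) (result : Int) (column : Nat)
    (operator : String) (columnsResult : Int) : Int :=
  match rows with
  | [] => result + columnsResult
  | c :: rest =>
    if PySem.Str.strip c = "" then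
      let column' := column + 1
      let operator' := (PySem.List.pyGet? operators ((operators.length : Int) - (column' : Int))).getD ""
      aLoop operators rest (result + columnsResult) column' operator'
        (if operator' = "+" then 0 else 1)
    else
      let value := (PySem.Int.ofStr? c).getD 0
      aLoop operators rest result column operator
        (if operator = "*" then columnsResult * value else columnsResult + value)

def calculateAll (matrix : List (List String)) (operators : List String) : Int :=
  let rows := pvRows matrix
  let operator := (PySem.List.pyGet? operators ((operators.length : Int) - (1 : Int))).getD ""
  aLoop operators rows 0 1 operator (if operator = "+" then 0 else 1)

-- ===== PORT B =====
-- _groupValue(op, g): reduce one group with A's start/combine rule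
def bGroupValue (op : String) (g : List Int) : Int :=
  g.foldl (fun value v => if op = "*" then value * v else value + v) (if op = "+" then 0 else 1)

def calculateAll_alt (matrix : List (List String)) (operators : List String) : Int :=
  let rows := pvRows matrix
  let st := rows.foldl
    (fun (st : List (List Int) × List Int) r =>
      if PySem.Str.strip r = "" then (st.1 ++ [st.2], [])
      else (st.1, st.2 ++ [(PySem.Int.ofStr? r).getD 0]))
    (([] : List (List Int)), ([] : List Int))
  let groups := st.1 ++ [st.2]
  let opsRev := operators.reverse
  (PySem.List.enumerate groups 0).foldl
    (fun total kg => total + bGroupValue ((PySem.List.pyGet? opsRev kg.1).getD "") kg.2) 0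

-- ===== PRECONDITION & SPEC =====
-- Pre_ excludes the inputs where A raises (a non-blank row that int() rejects: ValueError; more
-- groups than twice the operator count: IndexError) together with the region where the group count
-- exceeds the operator count but A still returns a value only through Python negative-index
-- wraparound of operators[len(operators)-column]: there B's ops_rev[k] naturally raises IndexError.
def Pre_calculateAll (matrix : List (List String)) (operators : List String) : Prop :=
  ((pvRows matrix).countP (fun r => PySem.Str.strip r = "")) + 1 ≤ operators.length ∧
  ∀ r ∈ pvRows matrix, PySem.Str.strip r ≠ "" → (PySem.Int.ofStr? r).isSome
instance (matrix : List (List String)) (operators : List String) : Decidable (Pre_calculateAll matrix operators) := by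
  unfold Pre_calculateAll; infer_instance

def pvWitness_calculateAll : List (List String) × List String := ([["1", "2"]], ["+", "*"])

def Spec_calculateAll (matrix : List (List String)) (operators : List String) (out : Int) : Prop := out = calculateAll_alt matrix operators
instance (matrix : List (List String)) (operators : List String) (out : Int) : Decidable (Spec_calculateAll matrix operators out) := by unfold Spec_calculateAll; infer_instance

-- ===== CLAIM (what is proved, stated in full; the proofs are below) =====
def Claim_equal_calculateAll : Prop := ∀ (matrix : List (List String)) (operators : List String), Dom_calculateAll matrix operators → Pre_calculateAll matrix operators → Spec_calculateAll matrix operators (calculateAll matrix operators)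

-- ===== LEMMAS AND PROOFS =====

-- the groups B's split pass produces, computed back-to-front (proof-side characterisation)
def groupsRec (rows : List String) : List (List Int) :=
  match rows with
  | [] => [[]]
  | r :: rs =>
    if PySem.Str.strip r = "" then [] :: groupsRec rs
    else
      match groupsRec rs with
      | g :: gs => (((PySem.Int.ofStr? r).getD 0) :: g) :: gs
      | [] => [[((PySem.Int.ofStr? r).getD 0)]]

-- B's per-group total from group index k on
def evalGroups (ops : List String) (k : Nat) : List (List Int) → Int
  | [] => 0
  | g :: gs =>
      bGroupValue ((PySem.List.pyGet? ops.reverse ((k : Int))).getD "") g + evalGroups ops (k + 1) gs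

lemma groupsRec_ne_nil (rows : List String) : groupsRec rows ≠ [] := by
  cases rows with
  | nil => decide
  | cons r rs =>
    simp only [groupsRec]
    split
    · simp
    · cases h : groupsRec rs <;> simp

-- A's from-the-end index equals B's index into the reversed list
lemma op_eq (ops : List String) (col : Nat) (h1 : 1 ≤ col) (h2 : col ≤ ops.length) :
    (PySem.List.pyGet? ops ((ops.length : Int) - (col : Int))).getD "" =
    (PySem.List.pyGet? ops.reverse (((col : Int) - 1))).getD "" := by
  have e1 : (ops.length : Int) - (col : Int) = ((ops.length - col : Nat) : Int) := by omega
  have e2 : (col : Int) - 1 = ((col - 1 : Nat) : Int) := by omega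
  rw [e1, e2, PySem.List.pyGet?_natCast, PySem.List.pyGet?_natCast]
  rw [List.getElem?_reverse (by simpa using (by omega : col - 1 < ops.length))]
  have e3 : ops.length - col = ops.length - 1 - (col - 1) := by omega
  rw [e3]

lemma aLoop_eq (ops : List String) (rows : List String) :
    ∀ (res cr : Int) (col : Nat), 1 ≤ col →
      col + rows.countP (fun r => PySem.Str.strip r = "") ≤ ops.length →
      aLoop ops rows res col ((PySem.List.pyGet? ops.reverse (((col : Int) - 1))).getD "") cr =
        res + (match groupsRec rows with
               | [] => 0
               | g :: gs =>
                   g.foldl (fun v x =>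
                     if ((PySem.List.pyGet? ops.reverse (((col : Int) - 1))).getD "") = "*"
                     then v * x else v + x) cr + evalGroups ops col gs) := by
  induction rows with
  | nil =>
    intro res cr col h1 h2
    simp [aLoop, groupsRec, evalGroups]
  | cons r rs ih =>
    intro res cr col h1 h2
    by_cases hb : PySem.Str.strip r = ""
    · have hcnt : col + 1 + rs.countP (fun r => PySem.Str.strip r = "") ≤ ops.length := by
        have := h2
        simp [hb] at this
        omega
      have hop : (PySem.List.pyGet? ops ((ops.length : Int) - ((col + 1 : Nat) : Int))).getD "" =
          (PySem.List.pyGet? ops.reverse ((((col + 1 : Nat) : Int) - 1))).getD "" := by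
        exact op_eq ops (col + 1) (by omega) (by omega)
      simp only [aLoop, hb, if_true]
      rw [hop]
      rw [ih (res + cr) _ (col + 1) (by omega) hcnt]
      have ecast : (((col + 1 : Nat) : Int)) - 1 = ((col : Nat) : Int) := by push_cast; ring
      rw [ecast]
      simp only [groupsRec, hb, if_true]
      cases hg : groupsRec rs with
      | nil => exact absurd hg (groupsRec_ne_nil rs)
      | cons g gs =>
        simp only [evalGroups, bGroupValue, List.foldl_nil]
        push_cast
        ring
    · have hcnt : col + rs.countP (fun r => PySem.Str.strip r = "") ≤ ops.length := by
        have := h2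
        simp [hb] at this
        omega
      simp only [aLoop, hb, if_neg hb]
      rw [ih res _ col h1 hcnt]
      simp only [groupsRec, hb, if_neg hb]
      cases hg : groupsRec rs with
      | nil => exact absurd hg (groupsRec_ne_nil rs)
      | cons g gs => simp [List.foldl_cons]

-- B's split fold produces groupsRec
lemma bSplit_eq (rows : List String) :
    ∀ (gsAcc : List (List Int)) (cur : List Int),
      ((rows.foldl
        (fun (st : List (List Int) × List Int) r =>
          if PySem.Str.strip r = "" then (st.1 ++ [st.2], [])
          else (st.1, st.2 ++ [(PySem.Int.ofStr? r).getD 0])) (gsAcc, cur)).1 ++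
       [(rows.foldl
        (fun (st : List (List Int) × List Int) r =>
          if PySem.Str.strip r = "" then (st.1 ++ [st.2], [])
          else (st.1, st.2 ++ [(PySem.Int.ofStr? r).getD 0])) (gsAcc, cur)).2]) =
      gsAcc ++ (match groupsRec rows with
                | [] => []
                | g :: gs => (cur ++ g) :: gs) := by
  induction rows with
  | nil => intro gsAcc cur; simp [groupsRec]
  | cons r rs ih =>
    intro gsAcc cur
    by_cases hb : PySem.Str.strip r = ""
    · simp only [List.foldl_cons, hb, if_pos rfl, if_true]
      rw [ih (gsAcc ++ [cur]) []]
      simp only [groupsRec, hb, if_pos rfl]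
      cases hg : groupsRec rs with
      | nil => exact absurd hg (groupsRec_ne_nil rs)
      | cons g gs => simp
    · simp only [List.foldl_cons, hb, if_neg hb, if_false]
      rw [ih gsAcc (cur ++ [(PySem.Int.ofStr? r).getD 0])]
      simp only [groupsRec, hb, if_neg hb]
      cases hg : groupsRec rs with
      | nil => exact absurd hg (groupsRec_ne_nil rs)
      | cons g gs => simp

-- B's enumerate fold is evalGroups
lemma enumFold_eq (ops : List String) (groups : List (List Int)) :
    ∀ (k : Nat) (t : Int),
      (PySem.List.enumerate groups ((k : Int))).foldl
        (fun total kg => total + bGroupValue ((PySem.List.pyGet? ops.reverse kg.1).getD "") kg.2) t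
      = t + evalGroups ops k groups := by
  induction groups with
  | nil => intro k t; simp [PySem.List.enumerate_nil, evalGroups]
  | cons g gs ih =>
    intro k t
    rw [PySem.List.enumerate_cons]
    simp only [List.foldl_cons]
    rw [show ((k : Int) + 1) = (((k + 1 : Nat)) : Int) by push_cast; ring]
    rw [ih (k + 1)]
    simp [evalGroups]
    ring

-- ===== VERDICT (by name: the statement is the Claim_ definition above) =====
theorem calculateAll_spec : Claim_equal_calculateAll := by
  intro matrix operators _hDom hPre
  obtain ⟨hcnt, _hparse⟩ := hPre
  have hlen : 1 ≤ operators.length := by omega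
  have hop1 : (PySem.List.pyGet? operators ((operators.length : Int) - (1 : Int))).getD "" =
      (PySem.List.pyGet? operators.reverse ((((1 : Nat) : Int) - 1))).getD "" :=
    op_eq operators 1 (le_refl 1) hlen
  have hsplit := bSplit_eq (pvRows matrix) [] []
  simp only [List.nil_append, List.append_nil] at hsplit
  unfold Spec_calculateAll calculateAll calculateAll_alt
  dsimp only
  rw [hop1, aLoop_eq operators (pvRows matrix) 0 _ 1 (le_refl 1) (by omega), hsplit]
  cases hg : groupsRec (pvRows matrix) with
  | nil => exact absurd hg (groupsRec_ne_nil (pvRows matrix))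
  | cons g gs =>
    have henum := enumFold_eq operators (g :: gs) 0 0
    norm_num at henum ⊢
    rw [henum]
    simp only [evalGroups, bGroupValue]
    push_cast
    ring
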